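-- pv_equiv track=rewrite | github.com/smomara/CSC370 | Homework #3/dirsort.py | dirsort
-- ===== SOURCE A (Python) =====
-- def dirsort(dirs):
--     dirs = sorted(dirs, key=lambda x: x.count("/"))
--
--     for i in range(1, len(dirs)):
--         if dirs[i].count('/') == dirs[i-1].count('/'):
--             if dirs[i] < dirs[i-1]:
--                 j = i
--                 while j > 0 and dirs[j].count('/') == dirs[j-1].count('/'):
--                     if dirs[j] < dirs[j-1]:
--                         dirs[j], dirs[j-1] = dirs[j-1], dirs[j]
--                     j -= 1
--
--     return dirs
-- ===== SOURCE B (Python) =====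
-- def dirsort(dirs):
--     buckets = {}
--     for d in dirs:
--         buckets.setdefault(d.count("/"), []).append(d)
--     out = []
--     for c in sorted(buckets):
--         out += sorted(buckets[c])
--     return out
-- ===== Notes on version B (the rewrite author's own statement) =====
-- stated objective: faster
-- what changed: Replaces the global stable sort plus quadratic in-place bubbling passes with a single-pass bucket partition by slash count followed by one lexicographic sort per bucket, concatenated in ascending count order.
import Mathlib
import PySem

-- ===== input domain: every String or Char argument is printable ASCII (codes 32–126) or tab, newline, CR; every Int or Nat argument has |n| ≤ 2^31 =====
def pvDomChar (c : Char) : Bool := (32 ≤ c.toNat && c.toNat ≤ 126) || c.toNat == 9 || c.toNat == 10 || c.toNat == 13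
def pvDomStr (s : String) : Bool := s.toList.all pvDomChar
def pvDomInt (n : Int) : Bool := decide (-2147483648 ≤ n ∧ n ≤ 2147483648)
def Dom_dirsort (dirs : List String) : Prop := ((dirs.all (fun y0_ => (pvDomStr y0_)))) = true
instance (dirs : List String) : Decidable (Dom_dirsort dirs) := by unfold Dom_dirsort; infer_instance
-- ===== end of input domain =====

-- B replaces A's global count-sort plus in-place bubbling passes with a one-pass bucket
-- partition by slash count followed by one lexicographic sort per bucket (objective: faster).

-- ===== PORT A =====
-- x.count("/") (Python's count is a nonnegative int; Nat here, compared identically)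
def pvCnt (s : String) : Nat := PySem.Str.count s "/"
-- dirs[k]: every index A uses is provably in range, so a defaulted read is exact here
def pvG (l : List String) (k : Nat) : String := l.getD k ""
-- dirs[a], dirs[b] = dirs[b], dirs[a]
def pvSwap (l : List String) (a b : Nat) : List String := (l.set a (pvG l b)).set b (pvG l a)
-- the inner 'while j > 0 and ...' loop, counting j down
def pvBubble (l : List String) (j : Nat) : List String :=
  match j with
  | 0 => l
  | j+1 =>
    if pvCnt (pvG l (j+1)) = pvCnt (pvG l j) then
      pvBubble (if pvG l (j+1) < pvG l j then pvSwap l (j+1) j else l) j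
    else l
-- the body of the outer 'for i in range(1, len(dirs))' loop
def pvPass (l : List String) (i : Nat) : List String :=
  if pvCnt (pvG l i) = pvCnt (pvG l (i-1)) then
    if pvG l i < pvG l (i-1) then pvBubble l i else l
  else l

def dirsort (dirs : List String) : List String :=
  let l0 := PySem.List.sorted dirs (fun x => pvCnt x) false
  -- range(1, len(dirs)) = [1, …, len-1]; the swaps preserve the length
  (List.range' 1 (l0.length - 1)).foldl pvPass l0

-- ===== PORT B =====
def dirsort_alt (dirs : List String) : List String :=
  -- buckets.setdefault(d.count("/"), []).append(d)
  let buckets := dirs.foldl (fun b d => b.modify (pvCnt d) [] (fun xs => xs ++ [d]))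
    (PySem.Dict.empty : PySem.Dict Nat (List String))
  -- for c in sorted(buckets): out += sorted(buckets[c])
  (PySem.List.sorted buckets.keys (fun x => x) false).foldl
    (fun out c => out ++ PySem.List.sorted (buckets.getD c []) (fun x => x) false) []

-- ===== PRECONDITION & SPEC =====
def Spec_dirsort (dirs : List String) (out : List String) : Prop := out = dirsort_alt dirs
instance (dirs : List String) (out : List String) : Decidable (Spec_dirsort dirs out) := by unfold Spec_dirsort; infer_instance

-- ===== CLAIM (what is proved, stated in full; the proofs are below) =====
def Claim_equal_dirsort : Prop := ∀ (dirs : List String), Dom_dirsort dirs → Spec_dirsort dirs (dirsort dirs)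

-- ===== LEMMAS AND PROOFS =====

-- the order both programs realise: by slash count, then lexicographically
def pvLe (s t : String) : Prop := pvCnt s < pvCnt t ∨ (pvCnt s = pvCnt t ∧ s ≤ t)

theorem pvLe_trans {a b c : String} (h1 : pvLe a b) (h2 : pvLe b c) : pvLe a c := by
  rcases h1 with h1 | ⟨h1, h1'⟩ <;> rcases h2 with h2 | ⟨h2, h2'⟩
  · exact Or.inl (h1.trans h2)
  · exact Or.inl (h2 ▸ h1)
  · exact Or.inl (h1 ▸ h2)
  · exact Or.inr ⟨h1.trans h2, le_trans h1' h2'⟩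

theorem pvLe_antisymm {a b : String} (h1 : pvLe a b) (h2 : pvLe b a) : a = b := by
  rcases h1 with h1 | ⟨h1, h1'⟩ <;> rcases h2 with h2 | ⟨h2, h2'⟩ <;> try omega
  exact le_antisymm h1' h2'

-- ---------- A-side: indexed sortedness predicates ----------
def pvPref (l : List String) (m : Nat) : Prop :=
  ∀ a b, a < b → b < m → pvLe (pvG l a) (pvG l b)

def pvCM (l : List String) : Prop :=
  ∀ a b, a < b → b < l.length → pvCnt (pvG l a) ≤ pvCnt (pvG l b)

theorem pvG_lt {l : List String} {k : Nat} (h : k < l.length) : pvG l k = l[k] := by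
  simp [pvG, List.getD_eq_getElem?_getD, List.getElem?_eq_getElem h]

theorem length_pvSwap (l : List String) (j : Nat) : (pvSwap l (j+1) j).length = l.length := by
  simp [pvSwap]

theorem pvG_swap_hi {l : List String} {j : Nat} (h : j + 1 < l.length) :
    pvG (pvSwap l (j+1) j) (j+1) = pvG l j := by
  simp [pvG, pvSwap, List.getD_eq_getElem?_getD,
    List.getElem?_set_ne (by omega : j ≠ j+1), List.getElem?_set_self h]

theorem pvG_swap_lo {l : List String} {j : Nat} (h : j + 1 < l.length) :
    pvG (pvSwap l (j+1) j) j = pvG l (j+1) := by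
  have hj : j < (l.set (j+1) (pvG l j)).length := by simp; omega
  simp only [pvG, pvSwap, List.getD_eq_getElem?_getD]
  rw [List.getElem?_set_self (by simpa using hj)]
  rfl

theorem pvG_swap_other {l : List String} {j k : Nat} (hk1 : k ≠ j) (hk2 : k ≠ j + 1) :
    pvG (pvSwap l (j+1) j) k = pvG l k := by
  simp [pvG, pvSwap, List.getD_eq_getElem?_getD,
    List.getElem?_set_ne (Ne.symm hk1), List.getElem?_set_ne (Ne.symm hk2)]

theorem pvSwap_perm : ∀ (j : Nat) (l : List String), j + 1 < l.length →
    (pvSwap l (j+1) j).Perm l := by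
  intro j
  induction j with
  | zero =>
    intro l h
    match l, h with
    | a :: b :: t, _ =>
      simp [pvSwap, pvG]
      exact List.Perm.swap a b t
  | succ j ih =>
    intro l h
    match l, h with
    | a :: t, h =>
      have : pvSwap (a :: t) (j+1+1) (j+1) = a :: pvSwap t (j+1) j := by
        simp [pvSwap, pvG, List.set_cons_succ]
      rw [this]
      exact (ih t (by simpa using h)).cons a

-- the inner while-loop sorts the prefix up to i, given the invariant: prefix below j sorted,
-- block j..i sorted, every prefix element below every block element above j
theorem pvBubble_spec : ∀ (j : Nat) (l : List String) (i : Nat), j ≤ i → i < l.length →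
    pvCM l → pvPref l j →
    (∀ a b, j ≤ a → a < b → b ≤ i → pvLe (pvG l a) (pvG l b)) →
    (∀ a b, a < j → j < b → b ≤ i → pvLe (pvG l a) (pvG l b)) →
    (pvBubble l j).length = l.length ∧ (pvBubble l j).Perm l ∧ pvCM (pvBubble l j) ∧
      pvPref (pvBubble l j) (i+1) := by
  intro j
  induction j with
  | zero =>
    intro l i _ _ hcm _ hblk _
    exact ⟨rfl, List.Perm.refl l, hcm, fun a b hab hb => hblk a b (Nat.zero_le a) hab (by omega)⟩
  | succ j ih =>
    intro l i hji hi hcm hpref hblk hcross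
    have hj1 : j + 1 < l.length := lt_of_le_of_lt hji hi
    by_cases hc : pvCnt (pvG l (j+1)) = pvCnt (pvG l j)
    · by_cases hlt : pvG l (j+1) < pvG l j
      · -- swap branch
        set l' := pvSwap l (j+1) j with hl'
        have hlen' : l'.length = l.length := length_pvSwap l j
        have ghi : pvG l' (j+1) = pvG l j := pvG_swap_hi hj1
        have glo : pvG l' j = pvG l (j+1) := pvG_swap_lo hj1
        have got : ∀ k, k ≠ j → k ≠ j+1 → pvG l' k = pvG l k := fun k h1 h2 => pvG_swap_other h1 h2
        have cntpt : ∀ k, pvCnt (pvG l' k) = pvCnt (pvG l k) := by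
          intro k
          by_cases h1 : k = j
          · rw [h1, glo]; exact hc
          · by_cases h2 : k = j+1
            · rw [h2, ghi]; exact hc.symm
            · rw [got k h1 h2]
        have hcm' : pvCM l' := by
          intro a b hab hb
          rw [cntpt, cntpt]; exact hcm a b hab (hlen' ▸ hb)
        have hpref' : pvPref l' j := by
          intro a b hab hb
          rw [got a (by omega) (by omega), got b (by omega) (by omega)]
          exact hpref a b hab (by omega)
        have hblk' : ∀ a b, j ≤ a → a < b → b ≤ i → pvLe (pvG l' a) (pvG l' b) := by
          intro a b ha hab hb
          rcases Nat.lt_or_ge a (j+1) with ha1 | ha1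
          · have haj : a = j := by omega
            rw [haj, glo]
            rcases Nat.lt_or_ge b (j+2) with hb1 | hb1
            · have hbj : b = j+1 := by omega
              rw [hbj, ghi]
              exact Or.inr ⟨hc, le_of_lt hlt⟩
            · rw [got b (by omega) (by omega)]
              exact hblk (j+1) b (le_refl _) (by omega) hb
          · rcases Nat.lt_or_ge a (j+2) with ha2 | ha2
            · have haj : a = j+1 := by omega
              rw [haj, ghi, got b (by omega) (by omega)]
              exact hcross j b (by omega) (by omega) hb
            · rw [got a (by omega) (by omega), got b (by omega) (by omega)]
              exact hblk a b (by omega) hab hb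
        have hcross' : ∀ a b, a < j → j < b → b ≤ i → pvLe (pvG l' a) (pvG l' b) := by
          intro a b ha hb hbi
          rw [got a (by omega) (by omega)]
          rcases Nat.lt_or_ge b (j+2) with hb1 | hb1
          · have hbj : b = j+1 := by omega
            rw [hbj, ghi]
            exact hpref a j ha (by omega)
          · rw [got b (by omega) (by omega)]
            exact hcross a b (by omega) (by omega) hbi
        have hres := ih l' i (by omega) (hlen' ▸ hi) hcm' hpref' hblk' hcross'
        have heq : pvBubble l (j+1) = pvBubble l' j := by
          rw [pvBubble]; simp [hc, hlt, hl']
        rw [heq]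
        exact ⟨hres.1.trans hlen', hres.2.1.trans (pvSwap_perm j l hj1), hres.2.2.1, hres.2.2.2⟩
      · -- no-swap branch
        have hjj1 : pvLe (pvG l j) (pvG l (j+1)) := Or.inr ⟨hc.symm, not_lt.mp hlt⟩
        have hblk' : ∀ a b, j ≤ a → a < b → b ≤ i → pvLe (pvG l a) (pvG l b) := by
          intro a b ha hab hb
          rcases Nat.lt_or_ge a (j+1) with ha1 | ha1
          · have haj : a = j := by omega
            rcases Nat.lt_or_ge b (j+2) with hb1 | hb1
            · have hbj : b = j+1 := by omega
              rw [haj, hbj]; exact hjj1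
            · exact pvLe_trans (haj ▸ hjj1) (hblk (j+1) b (le_refl _) (by omega) hb)
          · exact hblk a b (by omega) hab hb
        have hcross' : ∀ a b, a < j → j < b → b ≤ i → pvLe (pvG l a) (pvG l b) := by
          intro a b ha hb hbi
          rcases Nat.lt_or_ge b (j+2) with hb1 | hb1
          · have hbj : b = j+1 := by omega
            rw [hbj]
            exact pvLe_trans (hpref a j ha (by omega)) hjj1
          · exact hcross a b (by omega) (by omega) hbi
        have hres := ih l i (by omega) hi hcm (fun a b hab hb => hpref a b hab (by omega)) hblk' hcross'
        have heq : pvBubble l (j+1) = pvBubble l j := by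
          rw [pvBubble]; simp [hc, hlt]
        rw [heq]
        exact hres
    · -- counts differ: loop exits
      have heq : pvBubble l (j+1) = l := by rw [pvBubble]; simp [hc]
      rw [heq]
      have hbound : pvLe (pvG l j) (pvG l (j+1)) := by
        have := hcm j (j+1) (by omega) hj1
        exact Or.inl (lt_of_le_of_ne this (fun h => hc h.symm))
      refine ⟨rfl, List.Perm.refl l, hcm, ?_⟩
      intro a b hab hb
      rcases Nat.lt_or_ge b (j+1) with hb1 | hb1
      · exact hpref a b hab hb1
      · rcases Nat.lt_or_ge a (j+1) with ha1 | ha1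
        · have hale : pvLe (pvG l a) (pvG l j) := by
            rcases Nat.eq_or_lt_of_le (by omega : a ≤ j) with h | h
            · rw [h]; exact Or.inr ⟨rfl, le_refl _⟩
            · exact hpref a j h (by omega)
          rcases Nat.eq_or_lt_of_le hb1 with h | h
          · rw [← h]; exact pvLe_trans hale hbound
          · exact pvLe_trans hale (pvLe_trans hbound (hblk (j+1) b (le_refl _) (by omega) (by omega)))
        · exact hblk a b (by omega) hab (by omega)

theorem pvPref_succ_of_bound {l : List String} {s : Nat} (hs : 1 ≤ s)
    (hpref : pvPref l s) (hb : pvLe (pvG l (s-1)) (pvG l s)) : pvPref l (s+1) := by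
  intro a b hab hbs
  rcases Nat.lt_or_ge b s with h1 | h1
  · exact hpref a b hab h1
  · have hbeq : b = s := by omega
    rw [hbeq]
    rcases Nat.eq_or_lt_of_le (by omega : a ≤ s - 1) with h | h
    · rw [h]; exact hb
    · exact pvLe_trans (hpref a (s-1) h (by omega)) hb

theorem pvPass_spec (l : List String) (s : Nat) (hs : 1 ≤ s) (hlen : s < l.length)
    (hcm : pvCM l) (hpref : pvPref l s) :
    (pvPass l s).length = l.length ∧ (pvPass l s).Perm l ∧ pvCM (pvPass l s) ∧
      pvPref (pvPass l s) (s+1) := by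
  unfold pvPass
  by_cases hc : pvCnt (pvG l s) = pvCnt (pvG l (s-1))
  · by_cases hlt : pvG l s < pvG l (s-1)
    · rw [if_pos hc, if_pos hlt]
      exact pvBubble_spec s l s (le_refl s) hlen hcm hpref
        (fun a b ha hab hb => by exfalso; omega) (fun a b ha hb hbi => by exfalso; omega)
    · rw [if_pos hc, if_neg hlt]
      refine ⟨rfl, List.Perm.refl l, hcm, ?_⟩
      exact pvPref_succ_of_bound hs hpref (Or.inr ⟨hc.symm, not_lt.mp hlt⟩)
  · rw [if_neg hc]
    refine ⟨rfl, List.Perm.refl l, hcm, ?_⟩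
    refine pvPref_succ_of_bound hs hpref ?_
    have h1 := hcm (s-1) s (by omega) hlen
    exact Or.inl (lt_of_le_of_ne h1 (fun h => hc h.symm))

theorem pvFold_spec : ∀ (k s : Nat) (l : List String), 1 ≤ s → s + k ≤ l.length →
    pvCM l → pvPref l s →
    ((List.range' s k).foldl pvPass l).length = l.length ∧
    ((List.range' s k).foldl pvPass l).Perm l ∧
    pvPref ((List.range' s k).foldl pvPass l) (s + k) := by
  intro k
  induction k with
  | zero =>
    intro s l hs _ hcm hpref
    exact ⟨rfl, List.Perm.refl l, by simpa using hpref⟩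
  | succ k ih =>
    intro s l hs hsk hcm hpref
    rw [List.range'_succ, List.foldl_cons]
    have hp := pvPass_spec l s hs (by omega) hcm hpref
    have hrec := ih (s+1) (pvPass l s) (by omega) (by rw [hp.1]; omega) hp.2.2.1 hp.2.2.2
    refine ⟨hrec.1.trans hp.1, hrec.2.1.trans hp.2.1, ?_⟩
    have he : s + 1 + k = s + (k + 1) := by omega
    exact he ▸ hrec.2.2

theorem pairwise_of_pvPref {l : List String} (h : pvPref l l.length) : l.Pairwise pvLe :=
  List.pairwise_iff_getElem.mpr fun i j hi hj hij => by
    rw [← pvG_lt hi, ← pvG_lt hj]; exact h i j hij hj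

theorem pvCM_of_pairwise {l : List String} (h : l.Pairwise (fun a b => pvCnt a ≤ pvCnt b)) :
    pvCM l := by
  intro a b hab hb
  rw [pvG_lt (by omega), pvG_lt hb]
  exact List.pairwise_iff_getElem.mp h a b (by omega) hb hab

theorem dirsort_perm (dirs : List String) : (dirsort dirs).Perm dirs := by
  unfold dirsort
  set l0 := PySem.List.sorted dirs (fun x => pvCnt x) false with hl0
  have hperm0 : l0.Perm dirs := PySem.List.sorted_perm dirs (fun x => pvCnt x) false
  by_cases h0 : l0.length = 0
  · simp [h0]
    exact hperm0
  · have := pvFold_spec (l0.length - 1) 1 l0 (le_refl 1) (by omega)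
      (pvCM_of_pairwise (PySem.List.sorted_pairwise dirs (fun x => pvCnt x)))
      (fun a b hab hb => by exfalso; omega)
    exact this.2.1.trans hperm0

theorem dirsort_sorted (dirs : List String) : (dirsort dirs).Pairwise pvLe := by
  unfold dirsort
  set l0 := PySem.List.sorted dirs (fun x => pvCnt x) false with hl0
  by_cases h0 : l0.length = 0
  · simp [h0]
    rw [List.length_eq_zero_iff] at h0
    rw [h0]
    exact List.Pairwise.nil
  · have hfold := pvFold_spec (l0.length - 1) 1 l0 (le_refl 1) (by omega)
      (pvCM_of_pairwise (PySem.List.sorted_pairwise dirs (fun x => pvCnt x)))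
      (fun a b hab hb => by exfalso; omega)
    have he : 1 + (l0.length - 1) = ((List.range' 1 (l0.length - 1)).foldl pvPass l0).length := by
      rw [hfold.1]; omega
    exact pairwise_of_pvPref (he ▸ hfold.2.2)

-- ---------- B-side ----------
theorem buckets_getD (dirs : List String) (b : PySem.Dict Nat (List String)) (c : Nat) :
    (dirs.foldl (fun b d => b.modify (pvCnt d) [] (fun xs => xs ++ [d])) b).getD c []
      = b.getD c [] ++ dirs.filter (fun d => pvCnt d == c) := by
  induction dirs generalizing b with
  | nil => simp
  | cons d t ih =>
    rw [List.foldl_cons, ih, PySem.Dict.getD_modify]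
    by_cases h : c = pvCnt d
    · simp [h]
    · simp [h, Ne.symm h]

theorem flatMap_filter_perm : ∀ (ks : List Nat) (dirs : List String), ks.Nodup →
    (∀ d ∈ dirs, pvCnt d ∈ ks) →
    (ks.flatMap (fun c => dirs.filter (fun d => pvCnt d == c))).Perm dirs := by
  intro ks
  induction ks with
  | nil =>
    intro dirs _ hcov
    have : dirs = [] := List.eq_nil_iff_forall_not_mem.mpr (fun d hd => by simpa using hcov d hd)
    simp [this]
  | cons c ks ih =>
    intro dirs hnd hcov
    rw [List.flatMap_cons]
    have hrw : ks.flatMap (fun c' => dirs.filter (fun d => pvCnt d == c'))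
        = ks.flatMap (fun c' => (dirs.filter (fun d => !(pvCnt d == c))).filter (fun d => pvCnt d == c')) := by
      rw [List.flatMap, List.flatMap]
      congr 1
      apply List.map_congr_left
      intro c' hc'
      have hne : c' ≠ c := fun h => (List.nodup_cons.mp hnd).1 (h ▸ hc')
      rw [List.filter_filter]
      apply List.filter_congr
      intro d _
      by_cases h : pvCnt d = c'
      · simp [h, hne]
      · simp [h]
    rw [hrw]
    have hcov' : ∀ d ∈ dirs.filter (fun d => !(pvCnt d == c)), pvCnt d ∈ ks := by
      intro d hd
      rw [List.mem_filter] at hd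
      have := hcov d hd.1
      simp at this ⊢
      rcases this with h | h
      · exact absurd h (by simpa using hd.2)
      · exact h
    have := ih (dirs.filter (fun d => !(pvCnt d == c))) (List.nodup_cons.mp hnd).2 hcov'
    exact (List.Perm.append_left _ this).trans (List.filter_append_perm _ dirs)

theorem pairwise_flat : ∀ (ks : List Nat) (f : Nat → List String), ks.Pairwise (· < ·) →
    (∀ c ∈ ks, ∀ d ∈ f c, pvCnt d = c) → (∀ c ∈ ks, (f c).Pairwise (· ≤ ·)) →
    (ks.flatMap f).Pairwise pvLe := by
  intro ks
  induction ks with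
  | nil => intro f _ _ _; simp
  | cons c ks ih =>
    intro f hpw hcnt hle
    rw [List.flatMap_cons, List.pairwise_append]
    refine ⟨?_, ih f (List.pairwise_cons.mp hpw).2 (fun c' hc' => hcnt c' (by simp [hc'])) (fun c' hc' => hle c' (by simp [hc'])), ?_⟩
    · exact (hle c (by simp)).imp_of_mem (fun {a b} ha hb h =>
        Or.inr ⟨(hcnt c (by simp) a ha).trans (hcnt c (by simp) b hb).symm, h⟩)
    · intro x hx y hy
      rw [List.mem_flatMap] at hy
      obtain ⟨c', hc', hyc'⟩ := hy
      exact Or.inl (by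
        rw [hcnt c (by simp) x hx, hcnt c' (by simp [hc']) y hyc']
        exact (List.pairwise_cons.mp hpw).1 c' hc')

theorem keys_nodup (dirs : List String) :
    (dirs.foldl (fun b d => b.modify (pvCnt d) [] (fun xs => xs ++ [d]))
      (PySem.Dict.empty : PySem.Dict Nat (List String))).keys.Nodup :=
  PySem.Dict.nodup_keys_foldl_modify_key dirs pvCnt [] (fun _ d xs => xs ++ [d]) _
    (by rw [PySem.Dict.keys_empty]; exact List.nodup_nil)

theorem keys_cov (dirs : List String) (d : String) (hd : d ∈ dirs) :
    pvCnt d ∈ (dirs.foldl (fun b d => b.modify (pvCnt d) [] (fun xs => xs ++ [d]))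
      (PySem.Dict.empty : PySem.Dict Nat (List String))).keys := by
  rw [PySem.Dict.keys_foldl_modify_key dirs pvCnt [] (fun _ d xs => xs ++ [d]) _,
    PySem.Dict.keys_empty, PySem.Set.update_nil_left]
  rw [PySem.Set.mem_ofList]
  exact List.mem_map_of_mem hd

theorem sorted_keys_lt (ks : List Nat) (hnd : ks.Nodup) :
    (PySem.List.sorted ks (fun x => x) false).Pairwise (· < ·) := by
  have h1 := PySem.List.sorted_pairwise ks (fun x => x)
  have h2 : (PySem.List.sorted ks (fun x => x) false).Nodup :=
    (PySem.List.sorted_perm ks (fun x => x) false).nodup_iff.mpr hnd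
  exact (h1.and h2).imp (fun h => lt_of_le_of_ne h.1 h.2)

theorem flatMap_perm_of_perm : ∀ (ks : List Nat) (f g : Nat → List String),
    (∀ c ∈ ks, (f c).Perm (g c)) → (ks.flatMap f).Perm (ks.flatMap g) := by
  intro ks
  induction ks with
  | nil => intro f g _; simp
  | cons c ks ih =>
    intro f g h
    rw [List.flatMap_cons, List.flatMap_cons]
    exact (h c (by simp)).append (ih f g (fun c' hc' => h c' (by simp [hc'])))

def pvBuckets (dirs : List String) : PySem.Dict Nat (List String) :=
  dirs.foldl (fun b d => b.modify (pvCnt d) [] (fun xs => xs ++ [d])) PySem.Dict.empty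

theorem alt_eq (dirs : List String) :
    dirsort_alt dirs = (PySem.List.sorted (pvBuckets dirs).keys (fun x => x) false).flatMap
      (fun c => PySem.List.sorted (dirs.filter (fun d => pvCnt d == c)) (fun x => x) false) := by
  unfold dirsort_alt pvBuckets
  rw [PySem.List.foldl_append_eq_flatMap]
  rw [List.nil_append]
  congr 1
  funext c
  rw [buckets_getD, PySem.Dict.getD_empty, List.nil_append]

theorem dirsort_alt_perm (dirs : List String) : (dirsort_alt dirs).Perm dirs := by
  rw [alt_eq]
  set ks := PySem.List.sorted (pvBuckets dirs).keys (fun x => x) false with hks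
  have h1 : (ks.flatMap (fun c => PySem.List.sorted (dirs.filter (fun d => pvCnt d == c)) (fun x => x) false)).Perm
      (ks.flatMap (fun c => dirs.filter (fun d => pvCnt d == c))) :=
    flatMap_perm_of_perm ks _ _ (fun c _ => PySem.List.sorted_perm _ _ _)
  refine h1.trans (flatMap_filter_perm ks dirs ?_ ?_)
  · exact ((PySem.List.sorted_perm _ _ _).nodup_iff).mpr (keys_nodup dirs)
  · intro d hd
    rw [hks, PySem.List.mem_sorted]
    exact keys_cov dirs d hd

theorem dirsort_alt_sorted (dirs : List String) : (dirsort_alt dirs).Pairwise pvLe := by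
  rw [alt_eq]
  apply pairwise_flat
  · exact sorted_keys_lt _ (keys_nodup dirs)
  · intro c _ d hd
    rw [PySem.List.mem_sorted, List.mem_filter] at hd
    simpa using hd.2
  · intro c _
    exact PySem.List.sorted_pairwise _ _

-- ===== VERDICT (by name: the statement is the Claim_ definition above) =====
theorem dirsort_spec : Claim_equal_dirsort := by
  intro dirs _
  unfold Spec_dirsort
  exact List.Perm.eq_of_pairwise (fun _ _ _ _ => pvLe_antisymm)
    (dirsort_sorted dirs) (dirsort_alt_sorted dirs)
    ((dirsort_perm dirs).trans (dirsort_alt_perm dirs).symm)
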